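-- pv_equiv track=rewrite | github.com/zplus1209/DeepChatLocal | backend/chunkings/evaluation_framework/base_evaluation.py | _union_ranges
-- ===== SOURCE A (Python) =====
-- from typing import Any, Dict, List, Optional, Set, Tuple
--
-- def _union_ranges(ranges: List[Tuple[int, int]]) -> List[Tuple[int, int]]:
--     if not ranges:
--         return []
--     sr = sorted(ranges)
--     merged = [sr[0]]
--     for cs, ce in sr[1:]:
--         ls, le = merged[-1]
--         if cs <= le:
--             merged[-1] = (ls, max(le, ce))
--         else:
--             merged.append((cs, ce))
--     return merged
-- ===== SOURCE B (Python) =====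
-- from typing import List, Tuple
--
-- def _union_ranges(ranges: List[Tuple[int, int]]) -> List[Tuple[int, int]]:
--     # Sweep the sorted ranges from the RIGHT, keeping a stack `res` of the
--     # merged intervals built so far (descending; res[-1] is the leftmost).
--     # A new range absorbs every stacked interval whose start it reaches.
--     res: List[Tuple[int, int]] = []
--     for s, e in reversed(sorted(ranges)):
--         while res and res[-1][0] <= e:
--             e = max(e, res[-1][1])
--             res.pop()
--         res.append((s, e))
--     return res[::-1]
-- ===== Notes on version B (the rewrite author's own statement) =====
-- stated objective: alternative
-- what changed: B sweeps the sorted ranges from right to left with a stack, each new range cascading to absorb all stacked intervals it reaches, instead of A's left-to-right fold that mutates the last merged interval.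
import Mathlib
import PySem

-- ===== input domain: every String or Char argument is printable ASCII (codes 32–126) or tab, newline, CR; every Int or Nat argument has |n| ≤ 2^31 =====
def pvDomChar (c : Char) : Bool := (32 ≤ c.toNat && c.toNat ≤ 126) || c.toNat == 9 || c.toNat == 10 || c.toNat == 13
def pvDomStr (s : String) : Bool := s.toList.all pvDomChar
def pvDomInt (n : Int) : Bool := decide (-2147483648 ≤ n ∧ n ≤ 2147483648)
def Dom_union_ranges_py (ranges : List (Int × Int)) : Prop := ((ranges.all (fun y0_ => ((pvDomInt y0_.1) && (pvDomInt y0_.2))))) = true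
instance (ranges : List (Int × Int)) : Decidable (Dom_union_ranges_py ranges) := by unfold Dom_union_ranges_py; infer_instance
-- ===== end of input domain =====

-- B merges the sorted ranges back-to-front with a cascading absorption stack instead of
-- A's forward fold that mutates the last merged interval (objective: alternative).

-- ===== PORT A =====
-- one step of A's loop body: ls, le = merged[-1]; if cs <= le: merged[-1] = (ls, max(le, ce)) else merged.append((cs, ce))
def stepA (merged : List (Int × Int)) (c : Int × Int) : List (Int × Int) :=
  match merged.getLast? with
  | some (ls, le) => if c.1 ≤ le then merged.dropLast ++ [(ls, max le c.2)] else merged ++ [c]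
  | none => merged ++ [c]   -- unreachable: merged starts as [sr[0]] and never shrinks to []

def union_ranges_py (ranges : List (Int × Int)) : List (Int × Int) :=
  if ranges.isEmpty then []
  else
    match PySem.List.sorted2 ranges Prod.fst Prod.snd with   -- sr = sorted(ranges)
    | [] => []                                               -- unreachable (ranges ≠ [])
    | h :: t => t.foldl stepA [h]                            -- merged = [sr[0]]; for cs, ce in sr[1:]: …

-- ===== PORT B =====
-- Source B's inner while loop: res[-1] is the head here (res is kept reversed, so the final
-- `return res[::-1]` of Source B is the identity on this representation).
def absorbB (s e : Int) (res : List (Int × Int)) : List (Int × Int) :=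
  match res with
  | (hs, he) :: rest => if hs ≤ e then absorbB s (max e he) rest else (s, e) :: (hs, he) :: rest
  | [] => [(s, e)]

def union_ranges_py_alt (ranges : List (Int × Int)) : List (Int × Int) :=
  (PySem.List.sorted2 ranges Prod.fst Prod.snd).reverse.foldl
    (fun res c => absorbB c.1 c.2 res) []

-- ===== PRECONDITION & SPEC =====
def Spec_union_ranges_py (ranges : List (Int × Int)) (out : List (Int × Int)) : Prop := out = union_ranges_py_alt ranges
instance (ranges : List (Int × Int)) (out : List (Int × Int)) : Decidable (Spec_union_ranges_py ranges out) := by unfold Spec_union_ranges_py; infer_instance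

-- ===== CLAIM (what is proved, stated in full; the proofs are below) =====
def Claim_equal_union_ranges_py : Prop := ∀ (ranges : List (Int × Int)), Dom_union_ranges_py ranges → Spec_union_ranges_py ranges (union_ranges_py ranges)

-- ===== LEMMAS AND PROOFS =====

-- functional reading of A's loop: "current interval p, remaining sorted ranges t"
def mergeA (p : Int × Int) (t : List (Int × Int)) : List (Int × Int) :=
  match t with
  | [] => [p]
  | c :: t => if c.1 ≤ p.2 then mergeA (p.1, max p.2 c.2) t else p :: mergeA c t

theorem foldl_stepA (t : List (Int × Int)) : ∀ (acc : List (Int × Int)) (p : Int × Int),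
    t.foldl stepA (acc ++ [p]) = acc ++ mergeA p t := by
  induction t with
  | nil => intro acc p; simp [mergeA]
  | cons c t ih =>
    intro acc p
    simp only [List.foldl_cons, stepA, List.getLast?_concat, List.dropLast_concat, mergeA]
    by_cases h : c.1 ≤ p.2
    · simp [h, ih acc (p.1, max p.2 c.2)]
    · have := ih (acc ++ [p]) c
      simp [h, List.append_assoc] at this ⊢
      simpa using this

theorem mergeA_head (p : Int × Int) (t : List (Int × Int)) :
    ∃ e r, mergeA p t = (p.1, e) :: r := by
  induction t generalizing p with
  | nil => exact ⟨p.2, [], by simp [mergeA]⟩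
  | cons c t ih =>
    by_cases h : c.1 ≤ p.2
    · obtain ⟨e, r, hr⟩ := ih (p.1, max p.2 c.2)
      exact ⟨e, r, by simpa [mergeA, h] using hr⟩
    · exact ⟨p.2, mergeA c t, by simp [mergeA, h]⟩

theorem absorbB_absorbB (L : List (Int × Int)) : ∀ (p c : Int × Int), c.1 ≤ p.2 →
    absorbB p.1 p.2 (absorbB c.1 c.2 L) = absorbB p.1 (max p.2 c.2) L := by
  induction L with
  | nil => intro p c h; simp [absorbB, h]
  | cons q L ih =>
    intro p c h
    obtain ⟨hs, he⟩ := q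
    by_cases h1 : hs ≤ c.2
    · have h1' : hs ≤ max p.2 c.2 := le_trans h1 (le_max_right _ _)
      simp only [absorbB, if_pos h1, if_pos h1']
      have := ih p (c.1, max c.2 he) (by simpa using h)
      simp only at this
      rw [this]
      have : max p.2 (max c.2 he) = max (max p.2 c.2) he := (max_assoc _ _ _).symm
      rw [this]
    · simp only [absorbB, if_neg h1]
      simp [h, h1]

theorem absorbB_foldr (t : List (Int × Int)) : ∀ (p : Int × Int),
    absorbB p.1 p.2 (t.foldr (fun c res => absorbB c.1 c.2 res) []) = mergeA p t := by
  induction t with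
  | nil => intro p; simp [absorbB, mergeA]
  | cons c t ih =>
    intro p
    simp only [List.foldr_cons, mergeA]
    by_cases h : c.1 ≤ p.2
    · rw [absorbB_absorbB _ p c h, if_pos h]
      exact ih (p.1, max p.2 c.2)
    · rw [if_neg h]
      obtain ⟨e, r, hr⟩ := mergeA_head c t
      rw [ih c, hr]
      simp [absorbB, h]

-- ===== VERDICT (by name: the statement is the Claim_ definition above) =====
theorem union_ranges_py_spec : Claim_equal_union_ranges_py := by
  intro ranges _
  unfold Spec_union_ranges_py union_ranges_py union_ranges_py_alt
  rw [List.foldl_reverse]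
  by_cases hr : ranges.isEmpty
  · have : ranges = [] := List.isEmpty_iff.mp hr
    subst this
    simp [PySem.List.sorted2]
  · rw [if_neg hr]
    cases hs : PySem.List.sorted2 ranges Prod.fst Prod.snd with
    | nil => simp
    | cons h t =>
      have := foldl_stepA t [] h
      simp only [List.nil_append] at this
      change List.foldl stepA [h] t = _
      rw [this, List.foldr_cons, absorbB_foldr t h]
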